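-- pv_equiv track=rewrite | github.com/ValeriiYermak/Module7 | HW057.py | capital_text
-- ===== SOURCE A (Python) =====
-- def capital_text(s):
--     result = ""
--     capitalize_next = True
--     for el in s:
--         if capitalize_next and el.isalpha():
--             result = result + el.upper()
--             capitalize_next = False
--         else:
--             result = result + el
--         if el in [".", "!", "?"]:
--             capitalize_next = True
--     return result
-- ===== SOURCE B (Python) =====
-- def _cap_first(chunk):
--     # uppercase the first alphabetic character of the chunk (if any)
--     if not chunk:
--         return []
--     c = chunk[0]
--     if c.isalpha():
--         return [c.upper()] + chunk[1:]
--     return [c] + _cap_first(chunk[1:])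
--
-- def capital_text(s):
--     # partition into sentence chunks (punctuation kept with its chunk), then map + join
--     chunks = []
--     cur = []
--     for ch in s:
--         cur.append(ch)
--         if ch in ".!?":
--             chunks.append(cur)
--             cur = []
--     chunks.append(cur)
--     return "".join("".join(_cap_first(ch)) for ch in chunks)
-- ===== Notes on version B (the rewrite author's own statement) =====
-- stated objective: alternative
-- what changed: Replaces A's single stateful pass (a capitalize_next flag carried through one loop) by a partition-then-map decomposition: split the string into sentence chunks ending at .!?, uppercase the first alphabetic character of each chunk, and join.
import Mathlib
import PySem

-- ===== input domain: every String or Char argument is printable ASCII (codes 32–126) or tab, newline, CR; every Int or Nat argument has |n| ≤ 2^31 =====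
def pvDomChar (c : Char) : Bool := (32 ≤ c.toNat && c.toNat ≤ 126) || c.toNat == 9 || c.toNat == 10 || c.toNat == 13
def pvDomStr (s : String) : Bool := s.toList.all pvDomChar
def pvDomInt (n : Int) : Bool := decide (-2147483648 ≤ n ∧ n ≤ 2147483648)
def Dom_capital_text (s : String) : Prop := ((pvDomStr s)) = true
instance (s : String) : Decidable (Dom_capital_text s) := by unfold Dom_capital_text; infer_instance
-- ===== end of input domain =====

-- B changes the decomposition: partition-into-sentence-chunks then map-capitalize-first-letter, instead of A's single stateful pass (objective: alternative, no speed claim).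

-- shared helper: el in [".", "!", "?"] / ch in ".!?"
def pvPunct (c : Char) : Bool := c == '.' || c == '!' || c == '?'

-- ===== PORT A =====
-- loop body of A: state = (result, capitalize_next)
def stepA (st : List Char × Bool) (el : Char) : List Char × Bool :=
  let st1 := if st.2 && PySem.Chars.isalpha el
    then (st.1 ++ [PySem.Chars.upperChar el], false)
    else (st.1 ++ [el], st.2)
  if pvPunct el then (st1.1, true) else st1

def capital_text (s : String) : String :=
  String.ofList (s.toList.foldl stepA ([], true)).1

-- ===== PORT B =====
-- _cap_first: uppercase the first alphabetic character of the chunk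
def capFirstB : List Char → List Char
  | [] => []
  | c :: r => if PySem.Chars.isalpha c then PySem.Chars.upperChar c :: r else c :: capFirstB r

-- chunking loop body of B: state = (chunks, cur)
def stepB (st : List (List Char) × List Char) (ch : Char) : List (List Char) × List Char :=
  let cur := st.2 ++ [ch]
  if pvPunct ch then (st.1 ++ [cur], []) else (st.1, cur)

def capital_text_alt (s : String) : String :=
  let p := s.toList.foldl stepB ([], [])
  let chunks := p.1 ++ [p.2]
  String.ofList ((chunks.map capFirstB).flatten)

-- ===== PRECONDITION & SPEC =====
def Spec_capital_text (s : String) (out : String) : Prop := out = capital_text_alt s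
instance (s : String) (out : String) : Decidable (Spec_capital_text s out) := by unfold Spec_capital_text; infer_instance

-- ===== CLAIM (what is proved, stated in full; the proofs are below) =====
def Claim_equal_capital_text : Prop := ∀ (s : String), Dom_capital_text s → Spec_capital_text s (capital_text s)

-- ===== LEMMAS AND PROOFS =====

-- recursive characterisation of A's fold: (output, final flag)
def capAB : Bool → List Char → List Char × Bool
  | b, [] => ([], b)
  | b, c :: r =>
    let b1 := if pvPunct c then true else if b && PySem.Chars.isalpha c then false else b
    let p := capAB b1 r
    ((if b && PySem.Chars.isalpha c then PySem.Chars.upperChar c else c) :: p.1, p.2)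

-- recursive characterisation of B's chunking fold
def chRec : List Char → List Char → List (List Char) × List Char
  | cur, [] => ([], cur)
  | cur, c :: r =>
    if pvPunct c then ((cur ++ [c]) :: (chRec [] r).1, (chRec [] r).2)
    else chRec (cur ++ [c]) r

def allC (l : List Char) : List (List Char) := (chRec [] l).1 ++ [(chRec [] l).2]

def joinCap (cs : List (List Char)) : List Char := (cs.map capFirstB).flatten

def joinRaw1 : List (List Char) → List Char
  | [] => []
  | h :: t => h ++ joinCap t

theorem capA_fold (l : List Char) : ∀ (res : List Char) (b : Bool),
    l.foldl stepA (res, b) = (res ++ (capAB b l).1, (capAB b l).2) := by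
  induction l with
  | nil => intro res b; simp [capAB]
  | cons c r ih =>
    intro res b
    rw [List.foldl_cons]
    by_cases hp : pvPunct c = true <;> by_cases ha : (b && PySem.Chars.isalpha c) = true
    · have h1 : stepA (res, b) c = (res ++ [PySem.Chars.upperChar c], true) := by
        simp [stepA, hp, ha]
      rw [h1, ih]; simp [capAB, hp, ha]
    · have h1 : stepA (res, b) c = (res ++ [c], true) := by
        simp [stepA, hp, ha]
      rw [h1, ih]; simp [capAB, hp, ha]
    · have h1 : stepA (res, b) c = (res ++ [PySem.Chars.upperChar c], false) := by
        simp [stepA, hp, ha]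
      rw [h1, ih]; simp [capAB, hp, ha]
    · have h1 : stepA (res, b) c = (res ++ [c], b) := by
        simp [stepA, hp, ha]
      rw [h1, ih]; simp [capAB, hp, ha]

theorem chRec_fold (l : List Char) : ∀ (cs : List (List Char)) (cur : List Char),
    l.foldl stepB (cs, cur) = (cs ++ (chRec cur l).1, (chRec cur l).2) := by
  induction l with
  | nil => intro cs cur; simp [chRec]
  | cons c r ih =>
    intro cs cur
    rw [List.foldl_cons]
    by_cases hp : pvPunct c = true
    · have h1 : stepB (cs, cur) c = (cs ++ [cur ++ [c]], []) := by simp [stepB, hp]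
      rw [h1, ih]; simp [chRec, hp]
    · have h1 : stepB (cs, cur) c = (cs, cur ++ [c]) := by simp [stepB, hp]
      rw [h1, ih]; simp [chRec, hp]

-- prepending pending text onto the first chunk
theorem chRec_prepend (l : List Char) : ∀ (cur : List Char),
    chRec cur l = (match chRec [] l with
      | ([], fin) => ([], cur ++ fin)
      | (h :: t, fin) => ((cur ++ h) :: t, fin)) := by
  induction l with
  | nil => intro cur; simp [chRec]
  | cons c r ih =>
    intro cur
    by_cases hp : pvPunct c = true
    · simp [chRec, hp]
    · simp only [chRec, hp, if_false, Bool.false_eq_true, List.nil_append]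
      rw [ih (cur ++ [c]), ih [c]]
      rcases h : chRec [] r with ⟨cs, fin⟩
      cases cs <;> simp

theorem punct_not_alpha {c : Char} (h : pvPunct c = true) : PySem.Chars.isalpha c = false := by
  simp only [pvPunct, Bool.or_eq_true, beq_iff_eq] at h
  rcases h with (h | h) | h <;> subst h <;> decide

theorem main_lemma (l : List Char) :
    (capAB true l).1 = joinCap (allC l) ∧ (capAB false l).1 = joinRaw1 (allC l) := by
  induction l with
  | nil => constructor <;> simp [capAB, allC, chRec, joinCap, joinRaw1, capFirstB]
  | cons c r ih =>
    obtain ⟨ih1, ih2⟩ := ih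
    by_cases hp : pvPunct c = true
    · have ha := punct_not_alpha hp
      have h1 : allC (c :: r) = [c] :: allC r := by
        simp [allC, chRec, hp]
      exact ⟨by simp [capAB, hp, ha, h1, joinCap, joinRaw1, capFirstB, ih1],
        by simp [capAB, hp, ha, h1, joinCap, joinRaw1, capFirstB, ih1]⟩
    · have hne : allC r ≠ [] := by simp [allC]
      rcases hh : allC r with _ | ⟨H, T⟩
      · exact absurd hh hne
      · have h1 : allC (c :: r) = (c :: H) :: T := by
          simp only [allC, chRec, hp, if_false, Bool.false_eq_true, List.nil_append]
          rw [chRec_prepend r [c]]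
          rcases h : chRec [] r with ⟨cs, fin⟩
          have : cs ++ [fin] = H :: T := by simpa [allC, h] using hh
          cases cs with
          | nil => simp at this; simp [this.1, this.2]
          | cons x xs =>
            simp only [List.cons_append, List.cons.injEq] at this
            simp [this.1, ← this.2]
        by_cases ha : PySem.Chars.isalpha c = true
        · exact ⟨by simp [capAB, hp, ha, h1, joinCap, joinRaw1, capFirstB, ih2, hh],
            by simp [capAB, hp, ha, h1, joinCap, joinRaw1, capFirstB, ih2, hh]⟩
        · exact ⟨by simp [capAB, hp, ha, h1, joinCap, joinRaw1, capFirstB, ih1, hh],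
            by simp [capAB, hp, ha, h1, joinCap, joinRaw1, capFirstB, ih2, hh]⟩

-- ===== VERDICT (by name: the statement is the Claim_ definition above) =====
theorem capital_text_spec : Claim_equal_capital_text := by
  intro s _
  unfold Spec_capital_text capital_text capital_text_alt
  rw [capA_fold, chRec_fold]
  simp only [List.nil_append]
  rw [(main_lemma s.toList).1]
  rfl
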